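-- pv_equiv track=rewrite | github.com/724thomas/CodingChallenge_Python | baekjoon/2143.py | solution
-- ===== SOURCE A (Python) =====
-- from collections import defaultdict
--
-- def solution(target, arr1, arr2):
--
--     def get_subarray_sums(arr):
--         subarray_sums = defaultdict(int)
--         n = len(arr)
--         for i in range(n):
--             total = 0
--             for j in range(i, n):
--                 total += arr[j]
--                 subarray_sums[total] += 1
--         return subarray_sums
--
--     map1 = get_subarray_sums(arr1)
--     map2 = get_subarray_sums(arr2)
--
--     ans = 0
--     for k,v in map1.items():
--         temp = target - k
--         if temp in map2:
--             ans += (v * map2[temp])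
--     return ans
-- ===== SOURCE B (Python) =====
-- def solution(target, arr1, arr2):
--     def sums(arr):
--         prefix = [0]
--         acc = 0
--         for x in arr:
--             acc += x
--             prefix.append(acc)
--         return [prefix[j] - prefix[i]
--                 for i in range(len(prefix))
--                 for j in range(i + 1, len(prefix))]
--
--     def bl(a, v):
--         # leftmost insertion point of v in the sorted list a (binary search)
--         lo, hi = 0, len(a)
--         while lo < hi:
--             mid = (lo + hi) // 2
--             if a[mid] < v:
--                 lo = mid + 1
--             else:
--                 hi = mid
--         return lo
--
--     s2 = sorted(sums(arr2))
--     ans = 0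
--     for x in sums(arr1):
--         ans += bl(s2, target - x + 1) - bl(s2, target - x)
--     return ans
-- ===== Notes on version B (the rewrite author's own statement) =====
-- stated objective: alternative
-- what changed: Replaces the accumulating nested loops plus defaultdict hash-join by prefix-sum differences collected into plain lists, one sort, and a hand-written binary search that counts matches per subarray sum (no dictionary at all).
import Mathlib
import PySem

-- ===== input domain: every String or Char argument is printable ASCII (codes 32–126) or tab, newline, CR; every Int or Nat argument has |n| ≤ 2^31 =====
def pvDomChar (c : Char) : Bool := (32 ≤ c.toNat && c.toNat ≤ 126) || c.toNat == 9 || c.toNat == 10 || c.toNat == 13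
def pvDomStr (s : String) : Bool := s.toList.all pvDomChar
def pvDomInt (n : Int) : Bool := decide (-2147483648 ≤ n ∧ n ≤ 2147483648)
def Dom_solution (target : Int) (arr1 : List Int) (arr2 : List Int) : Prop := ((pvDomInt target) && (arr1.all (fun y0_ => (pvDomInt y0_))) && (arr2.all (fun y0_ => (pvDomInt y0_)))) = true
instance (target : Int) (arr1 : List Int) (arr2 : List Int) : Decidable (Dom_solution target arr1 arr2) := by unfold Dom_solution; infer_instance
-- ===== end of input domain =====

-- B replaces the accumulating nested loops plus defaultdict hash-join by prefix-sum
-- differences collected into plain lists, one sort, and a hand-written binary search that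
-- counts matches per subarray sum (no dictionary); objective: alternative (not faster).

-- ===== PORT A =====
def getSubarraySums (arr : List Int) : PySem.Dict Int Int :=
  (PySem.List.pyRange 0 (arr.length : Int) 1).foldl
    (fun d i =>
      ((PySem.List.pyRange i (arr.length : Int) 1).foldl
        (fun (s : Int × PySem.Dict Int Int) j =>
          (s.1 + PySem.List.pyGetD arr j 0,
           s.2.modify (s.1 + PySem.List.pyGetD arr j 0) 0 (· + 1)))
        (0, d)).2)
    PySem.Dict.empty

def solution (target : Int) (arr1 : List Int) (arr2 : List Int) : Int :=
  let map1 := getSubarraySums arr1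
  let map2 := getSubarraySums arr2
  map1.items.foldl
    (fun ans kv =>
      if map2.contains (target - kv.1) then ans + kv.2 * map2.getD (target - kv.1) 0 else ans)
    0

-- ===== PORT B =====
def subSums (arr : List Int) : List Int :=
  let pa := arr.foldl
    (fun (s : List Int × Int) x => (s.1 ++ [s.2 + x], s.2 + x))
    ([0], 0)
  (PySem.List.pyRange 0 (pa.1.length : Int) 1).flatMap
    (fun i =>
      (PySem.List.pyRange (i + 1) (pa.1.length : Int) 1).map
        (fun j => PySem.List.pyGetD pa.1 j 0 - PySem.List.pyGetD pa.1 i 0))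

/-- B's hand-written binary-search loop (`while lo < hi`). -/
def blLoop (a : List Int) (v : Int) (lo hi : Int) : Int :=
  if hlt : lo < hi then
    let mid := PySem.Int.floordiv (lo + hi) 2
    if PySem.List.pyGetD a mid 0 < v then blLoop a v (mid + 1) hi
    else blLoop a v lo mid
  else lo
termination_by (hi - lo).toNat
decreasing_by
  · have h1 := PySem.Int.floordiv_two_mid_bounds (le_of_lt hlt)
    omega
  · have h2 : PySem.Int.floordiv (lo + hi) 2 < hi := by
      rw [PySem.Int.floordiv_lt_iff_lt_mul (by omega)]
      omega
    omega

/-- B's `bl`: leftmost insertion point of `v` in the sorted list `a`. -/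
def bl (a : List Int) (v : Int) : Int := blLoop a v 0 (a.length : Int)

def solution_alt (target : Int) (arr1 : List Int) (arr2 : List Int) : Int :=
  let s2 := PySem.List.sorted (subSums arr2) (fun x => x) false
  (subSums arr1).foldl
    (fun ans x => ans + (bl s2 (target - x + 1) - bl s2 (target - x))) 0

-- ===== PRECONDITION & SPEC =====
def Spec_solution (target : Int) (arr1 : List Int) (arr2 : List Int) (out : Int) : Prop := out = solution_alt target arr1 arr2
instance (target : Int) (arr1 : List Int) (arr2 : List Int) (out : Int) : Decidable (Spec_solution target arr1 arr2 out) := by unfold Spec_solution; infer_instance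

-- ===== CLAIM (what is proved, stated in full; the proofs are below) =====
def Claim_equal_solution : Prop := ∀ (target : Int) (arr1 : List Int) (arr2 : List Int), Dom_solution target arr1 arr2 → Spec_solution target arr1 arr2 (solution target arr1 arr2)

-- ===== LEMMAS AND PROOFS =====

/-- Partial sums of `l` shifted by `t`: the values A's inner accumulator takes. -/
def psumsFrom (t : Int) : List Int → List Int
  | [] => []
  | x :: xs => (t + x) :: psumsFrom (t + x) xs

/-- The subarray sums, row by starting index. -/
def allRows (arr : List Int) : List (List Int) :=
  (List.range arr.length).map (fun i => psumsFrom 0 (arr.drop i))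

lemma psumsFrom_eq_map (l : List Int) : ∀ t : Int,
    psumsFrom t l = (List.range l.length).map (fun k => t + (l.take (k + 1)).sum) := by
  induction l with
  | nil => intro t; simp [psumsFrom]
  | cons x xs ih =>
    intro t
    simp only [psumsFrom, List.length_cons, List.range_succ_eq_map, List.map_cons,
      List.map_map, ih]
    congr 1
    · simp
    · apply List.map_congr_left
      intro k _
      simp [List.take_succ_cons, add_assoc]

lemma foldl_inner (l : List Int) : ∀ (t : Int) (d : PySem.Dict Int Int),
    l.foldl (fun (s : Int × PySem.Dict Int Int) x =>
        (s.1 + x, s.2.modify (s.1 + x) 0 (· + 1))) (t, d)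
      = (t + l.sum, (psumsFrom t l).foldl (fun d s => d.modify s 0 (· + 1)) d) := by
  induction l with
  | nil => intro t d; simp [psumsFrom]
  | cons x xs ih => intro t d; simp [psumsFrom, ih, add_assoc]

/-- A's per-array dict is the Counter of the flattened subarray-sum rows. -/
lemma getSubarraySums_eq (arr : List Int) :
    getSubarraySums arr = PySem.Dict.counter (allRows arr).flatten := by
  unfold getSubarraySums
  rw [PySem.Dict.counter_eq_foldl, List.foldl_flatten]
  unfold allRows
  rw [PySem.List.pyRange_one, List.foldl_map, List.foldl_map]
  apply PySem.List.foldl_congr_mem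
  intro d k hk
  rw [PySem.List.foldl_pyRange_pyGetD' arr 0
      (f := fun (s : Int × PySem.Dict Int Int) x => (s.1 + x, s.2.modify (s.1 + x) 0 (· + 1)))
      (0, d) (by omega : (0:Int) ≤ 0 + (k : Int))]
  rw [foldl_inner]
  norm_num

/-- A's join loop, with the `in`-test removed (a missing key has count 0). -/
lemma counted_sum (target : Int) (S L1 L2 : List Int) :
    S.foldl (fun ans k =>
        if L2.contains (target - k) then
          ans + (List.count k L1 : Int) * (List.count (target - k) L2 : Int) else ans) 0
      = (S.map (fun k => (List.count k L1 : Int) * (List.count (target - k) L2 : Int))).sum := by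
  rw [PySem.List.foldl_congr_mem _ _
      (fun ans k => ans + (List.count k L1 : Int) * (List.count (target - k) L2 : Int)) _ ?_]
  · rw [PySem.List.foldl_add]; simp
  · intro ans k _
    by_cases h : L2.contains (target - k)
    · rw [if_pos h]
    · rw [if_neg h]
      have hz : List.count (target - k) L2 = 0 := by
        rw [List.count_eq_zero]; simpa using h
      simp [hz]

/-- Grouping: summing `g` over a list equals summing `count · * g ·` over its distinct elements. -/
lemma group_sum (L : List Int) (g : Int → Int) :
    ((PySem.Set.ofList L).map (fun k => (List.count k L : Int) * g k)).sum = (L.map g).sum := by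
  have h1 : ((PySem.Set.ofList L).map (fun k => (List.count k L : Int) * g k)).sum
      = ∑ m ∈ L.toFinset, (List.count m L : Int) * g m := by
    rw [← List.sum_toFinset _ (PySem.Set.nodup_ofList L)]
    apply Finset.sum_congr _ (fun _ _ => rfl)
    apply Finset.ext
    intro a
    simp [PySem.Set.mem_ofList]
  have h2 : (L.map g).sum = ∑ m ∈ L.toFinset, (List.count m L : Int) * g m := by
    have := Finset.sum_multiset_map_count (L : Multiset Int) g
    simp only [Multiset.map_coe, Multiset.sum_coe, List.toFinset_coe, Multiset.coe_count] at this
    rw [this]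
    apply Finset.sum_congr rfl
    intro m _
    simp
  rw [h1, h2]

/-- A's value, in closed form. -/
lemma solution_closed (target : Int) (arr1 arr2 : List Int) :
    solution target arr1 arr2
      = (((allRows arr1).flatten).map
          (fun x => ((List.count (target - x) ((allRows arr2).flatten) : Nat) : Int))).sum := by
  unfold solution
  show ((getSubarraySums arr1).items.foldl
      (fun ans kv =>
        if (getSubarraySums arr2).contains (target - kv.1) then
          ans + kv.2 * (getSubarraySums arr2).getD (target - kv.1) 0 else ans) 0) = _
  rw [getSubarraySums_eq, getSubarraySums_eq]
  set L1 := (allRows arr1).flatten with hL1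
  set L2 := (allRows arr2).flatten with hL2
  rw [PySem.Dict.items_counter, List.foldl_map]
  rw [PySem.List.foldl_congr_mem _ _
      (fun ans k => if L2.contains (target - k) then
        ans + (List.count k L1 : Int) * (List.count (target - k) L2 : Int) else ans) _ ?_]
  · rw [counted_sum, group_sum]
  · intro ans k _
    simp only [PySem.Dict.contains_counter, PySem.Dict.getD_counter]

/-- B's prefix loop builds exactly `[0] ++` the partial sums. -/
lemma foldl_prefix (l : List Int) : ∀ (p : List Int) (t : Int),
    l.foldl (fun (s : List Int × Int) x => (s.1 ++ [s.2 + x], s.2 + x)) (p, t)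
      = (p ++ psumsFrom t l, t + l.sum) := by
  induction l with
  | nil => intro p t; simp [psumsFrom]
  | cons x xs ih => intro p t; simp [psumsFrom, ih, add_assoc]

/-- The prefix list is the list of sums of initial segments. -/
lemma pre_eq (arr : List Int) :
    [(0 : Int)] ++ psumsFrom 0 arr
      = (List.range (arr.length + 1)).map (fun k => ((arr.take k).sum : Int)) := by
  rw [psumsFrom_eq_map, List.range_succ_eq_map]
  simp [List.map_map, Function.comp]

lemma pyGetD_pre (arr : List Int) (j : Int) (h0 : 0 ≤ j) (h1 : j < (arr.length : Int) + 1) :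
    PySem.List.pyGetD ((List.range (arr.length + 1)).map (fun k => ((arr.take k).sum : Int))) j 0
      = (arr.take j.toNat).sum := by
  rw [PySem.List.pyGetD_eq_getElem _ 0 h0 (by simp; omega)]
  simp

/-- One comprehension row of B equals one accumulation row of A. -/
lemma row_eq (arr : List Int) (k : Nat) (hk : k ≤ arr.length) :
    (PySem.List.pyRange ((k : Int) + 1) ((arr.length : Int) + 1) 1).map
      (fun j => PySem.List.pyGetD ((List.range (arr.length + 1)).map (fun k => ((arr.take k).sum : Int))) j 0
              - PySem.List.pyGetD ((List.range (arr.length + 1)).map (fun k => ((arr.take k).sum : Int))) (k : Int) 0)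
      = psumsFrom 0 (arr.drop k) := by
  rw [PySem.List.pyRange_one, List.map_map, psumsFrom_eq_map]
  have hlen : ((arr.length : Int) + 1 - ((k : Int) + 1)).toNat = (arr.drop k).length := by
    simp
  rw [hlen]
  apply List.map_congr_left
  intro m hm
  have hm' : m < arr.length - k := by simpa using hm
  have e1 : PySem.List.pyGetD ((List.range (arr.length + 1)).map (fun k => ((arr.take k).sum : Int)))
      ((k : Int) + 1 + (m : Int)) 0 = (arr.take (k + (m + 1))).sum := by
    rw [pyGetD_pre arr _ (by omega) (by omega)]
    have ht : (((k : Int) + 1 + (m : Int))).toNat = k + (m + 1) := by omega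
    rw [ht]
  have e2 : PySem.List.pyGetD ((List.range (arr.length + 1)).map (fun k => ((arr.take k).sum : Int)))
      (k : Int) 0 = (arr.take k).sum := by
    rw [pyGetD_pre arr _ (by omega) (by omega)]
    simp
  simp only [Function.comp, e1, e2]
  rw [List.take_add, List.sum_append]
  omega

/-- B's sum list is the flattened rows. -/
lemma subSums_eq (arr : List Int) : subSums arr = (allRows arr).flatten := by
  unfold subSums
  show ((PySem.List.pyRange 0 (((arr.foldl (fun (s : List Int × Int) x => (s.1 ++ [s.2 + x], s.2 + x)) ([0], 0)).1.length : Int)) 1).flatMap _) = _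
  rw [foldl_prefix]
  simp only [pre_eq]
  have hlast : ((List.range (arr.length + 1)).map (fun k => ((arr.take k).sum : Int))).length = arr.length + 1 := by simp
  rw [List.flatMap_def, PySem.List.pyRange_one]
  have hn : ((((List.range (arr.length + 1)).map (fun k => ((arr.take k).sum : Int))).length : Int) - 0).toNat = arr.length + 1 := by
    rw [hlast]; omega
  rw [hn, List.map_map]
  have e0 : ∀ m ∈ List.range (arr.length + 1),
      ((fun i => (PySem.List.pyRange (i + 1) (((List.range (arr.length + 1)).map (fun k => ((arr.take k).sum : Int))).length : Int) 1).map
        (fun j => PySem.List.pyGetD ((List.range (arr.length + 1)).map (fun k => ((arr.take k).sum : Int))) j 0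
                - PySem.List.pyGetD ((List.range (arr.length + 1)).map (fun k => ((arr.take k).sum : Int))) i 0)) ∘ (fun k : Nat => (0 : Int) + k)) m
      = psumsFrom 0 (arr.drop m) := by
    intro m hm
    have hm' : m ≤ arr.length := by simp at hm; omega
    simp only [Function.comp, zero_add, hlast]
    rw [show ((arr.length + 1 : Nat) : Int) = (arr.length : Int) + 1 by push_cast; rfl]
    exact row_eq arr m hm'
  rw [List.map_congr_left e0]
  unfold allRows
  rw [List.range_succ, List.map_append, List.flatten_append]
  simp [psumsFrom]

/-- Index characterisation of `countP`: if `p` holds exactly below index `r`, the count is `r`. -/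
lemma countP_index (a : List Int) (p : Int → Bool) (r : Nat) (hr : r ≤ a.length)
    (h : ∀ (j : Nat) (hj : j < a.length), (p a[j] = true ↔ j < r)) : a.countP p = r := by
  have hsplit := (List.take_append_drop r a).symm
  rw [hsplit, List.countP_append]
  have h1 : (a.take r).countP p = (a.take r).length := by
    rw [List.countP_eq_length]
    intro x hx
    obtain ⟨j, hj, hxj⟩ := List.mem_iff_getElem.mp hx
    have hj' : j < r := by simp at hj; omega
    have hja : j < a.length := by omega
    have he : (a.take r)[j] = a[j]'hja := List.getElem_take
    rw [← hxj, he]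
    exact (h j hja).mpr hj'
  have h2 : (a.drop r).countP p = 0 := by
    rw [List.countP_eq_zero]
    intro x hx
    obtain ⟨j, hj, hxj⟩ := List.mem_iff_getElem.mp hx
    have hja : r + j < a.length := by simp at hj; omega
    have he : (a.drop r)[j] = a[r + j]'hja := List.getElem_drop
    rw [← hxj, he]
    intro hp
    have := (h (r + j) hja).mp hp
    omega
  rw [h1, h2]
  simp
  omega

/-- The binary-search loop computes `countP (· < v)` under its invariants. -/
lemma blLoop_spec (a : List Int) (v : Int) (hs : a.Pairwise (· ≤ ·)) :
    ∀ (N : Nat) (lo hi : Int), (hi - lo).toNat ≤ N → 0 ≤ lo → lo ≤ hi → hi ≤ (a.length : Int) →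
    (∀ (j : Nat) (hj : j < a.length), (j : Int) < lo → a[j] < v) →
    (∀ (j : Nat) (hj : j < a.length), hi ≤ (j : Int) → ¬ a[j] < v) →
    blLoop a v lo hi = ((a.countP (fun x => decide (x < v)) : Nat) : Int) := by
  intro N
  induction N with
  | zero =>
    intro lo hi hN h0 hlh hhl hlow hhigh
    have heq : lo = hi := by omega
    rw [blLoop, dif_neg (by omega)]
    have hc : a.countP (fun x => decide (x < v)) = lo.toNat := by
      apply countP_index a _ lo.toNat (by omega)
      intro j hj
      constructor
      · intro hp
        by_contra hge
        exact hhigh j hj (by omega) (by simpa using hp)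
      · intro hlt
        simpa using hlow j hj (by omega)
    rw [hc]
    omega
  | succ N ih =>
    intro lo hi hN h0 hlh hhl hlow hhigh
    rw [blLoop]
    by_cases hlt : lo < hi
    · rw [dif_pos hlt]
      have hmid := PySem.Int.floordiv_two_mid_bounds (le_of_lt hlt)
      have hmhi : PySem.Int.floordiv (lo + hi) 2 < hi := by
        rw [PySem.Int.floordiv_lt_iff_lt_mul (by omega)]
        omega
      set mid := PySem.Int.floordiv (lo + hi) 2 with hmiddef
      have hmlen : mid < (a.length : Int) := by omega
      have hget : PySem.List.pyGetD a mid 0 = a[mid.toNat]'(by omega) := by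
        rw [PySem.List.pyGetD_eq_getElem a 0 (by omega) hmlen]
      by_cases hv : PySem.List.pyGetD a mid 0 < v
      · rw [if_pos hv]
        apply ih (mid + 1) hi (by omega) (by omega) (by omega) (by omega)
        · intro j hj hjlt
          by_cases hjlo : (j : Int) < lo
          · exact hlow j hj hjlo
          · rcases lt_or_eq_of_le (show j ≤ mid.toNat by omega) with hcase | hcase
            · have hle := List.pairwise_iff_getElem.mp hs j mid.toNat hj (by omega) hcase
              rw [hget] at hv
              omega
            · subst hcase
              rw [hget] at hv
              exact hv
        · exact hhigh
      · rw [if_neg hv]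
        apply ih lo mid (by omega) (by omega) (by omega) (by omega)
        · exact hlow
        · intro j hj hjge
          rcases lt_or_eq_of_le (show mid.toNat ≤ j by omega) with hcase | hcase
          · have hle := List.pairwise_iff_getElem.mp hs mid.toNat j (by omega) hj hcase
            rw [hget] at hv
            omega
          · rw [hget] at hv
            subst hcase
            exact hv
    · rw [dif_neg hlt]
      have hc : a.countP (fun x => decide (x < v)) = lo.toNat := by
        apply countP_index a _ lo.toNat (by omega)
        intro j hj
        constructor
        · intro hp
          by_contra hge
          exact hhigh j hj (by omega) (by simpa using hp)
        · intro hjlt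
          simpa using hlow j hj (by omega)
      rw [hc]
      omega

lemma bl_eq (a : List Int) (v : Int) (hs : a.Pairwise (· ≤ ·)) :
    bl a v = ((a.countP (fun x => decide (x < v)) : Nat) : Int) := by
  apply blLoop_spec a v hs (a.length + 1) 0 (a.length : Int) (by omega) (by omega) (by omega)
    (by omega)
  · intro j hj hjlt
    omega
  · intro j hj hge
    omega

lemma countP_succ (s : List Int) (t : Int) :
    s.countP (fun x => decide (x < t + 1)) = s.countP (fun x => decide (x < t)) + s.count t := by
  induction s with
  | nil => simp
  | cons x xs ih =>
    rw [List.countP_cons, List.countP_cons, List.count_cons, ih]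
    by_cases h1 : x < t + 1 <;> by_cases h2 : x < t <;> by_cases h3 : x = t <;>
      simp [h1, h2, h3] <;> omega

/-- Two binary searches on the sorted copy count the occurrences of `t` in `L`. -/
lemma count_by_bisect (L : List Int) (t : Int) :
    bl (PySem.List.sorted L (fun x => x) false) (t + 1)
      - bl (PySem.List.sorted L (fun x => x) false) t = ((L.count t : Nat) : Int) := by
  have hs : (PySem.List.sorted L (fun x => x) false).Pairwise (· ≤ ·) := by
    simpa using PySem.List.sorted_pairwise L (fun x => x)
  rw [bl_eq _ _ hs, bl_eq _ _ hs, countP_succ]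
  have hperm : (PySem.List.sorted L (fun x => x) false).Perm L :=
    PySem.List.sorted_perm L (fun x => x) false
  rw [hperm.count_eq]
  push_cast
  omega

-- ===== VERDICT (by name: the statement is the Claim_ definition above) =====
theorem solution_spec : Claim_equal_solution := by
  intro target arr1 arr2 _
  unfold Spec_solution solution_alt
  show solution target arr1 arr2
      = (subSums arr1).foldl
          (fun ans x => ans +
            (bl (PySem.List.sorted (subSums arr2) (fun x => x) false) (target - x + 1)
              - bl (PySem.List.sorted (subSums arr2) (fun x => x) false) (target - x))) 0
  rw [PySem.List.foldl_congr_mem _ _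
      (fun ans x => ans + ((List.count (target - x) (subSums arr2) : Nat) : Int)) _ ?_]
  · rw [PySem.List.foldl_add, subSums_eq, subSums_eq, solution_closed]
    simp
  · intro ans x _
    rw [count_by_bisect]
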